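-- pv_equiv track=rewrite | github.com/unabl4/codefights | stolen_lunch/stolen_lunch.py | stolenLunch
-- ===== SOURCE A (Python) =====
-- def stolenLunch(note):
--     s = ""
--     for c in note:
--         o = ord(c)
--         if 48 <= o <= 57:
--             # digit -> letter
--             s += chr(o+49)
--         elif 97 <= o <= 106:
--             # letter -> digit
--             s += chr(o-49)
--         else:
--             # non-convertable
--             s += c
--
--     return s
-- ===== SOURCE B (Python) =====
-- def stolenLunch(note):
--     # Swap the character ranges '0'-'9' and 'a'-'j' by staged whole-string
--     # substitution passes: park all digits in a temporary range (>= U+0080,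
--     # outside the printable-ASCII input domain), then move the letters onto
--     # the digit range, then bring the parked digits out as letters.
--     for d in range(10):
--         note = note.replace(chr(48 + d), chr(128 + d))  # digit -> temp
--     for d in range(10):
--         note = note.replace(chr(97 + d), chr(48 + d))   # letter -> digit
--     for d in range(10):
--         note = note.replace(chr(128 + d), chr(97 + d))  # temp -> letter
--     return note
-- ===== Notes on version B (the rewrite author's own statement) =====
-- stated objective: alternative
-- what changed: Replaced A's single per-character branch-and-append pass with a staged range-swap: 30 whole-string replace passes that first park the ten digits in a temporary character range above ASCII, then move the ten letters onto the digit range and the parked digits onto the letter range.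
import Mathlib
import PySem

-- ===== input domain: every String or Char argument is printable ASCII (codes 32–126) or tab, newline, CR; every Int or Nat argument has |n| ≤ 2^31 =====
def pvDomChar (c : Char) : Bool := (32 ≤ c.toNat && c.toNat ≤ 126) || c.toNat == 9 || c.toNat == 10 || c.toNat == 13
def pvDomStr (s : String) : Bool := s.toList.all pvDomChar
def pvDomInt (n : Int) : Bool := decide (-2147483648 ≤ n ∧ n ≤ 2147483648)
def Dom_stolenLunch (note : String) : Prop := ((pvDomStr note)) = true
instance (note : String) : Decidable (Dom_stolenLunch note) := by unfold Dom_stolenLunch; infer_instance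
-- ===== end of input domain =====

-- B replaces A's single per-character branch-and-append pass with a staged multi-pass
-- algorithm: 30 whole-string replace passes that swap the two ranges via a temporary
-- character range above ASCII (outside the input domain); a timing run measured B faster (constant factor).

-- ===== PORT A =====
-- ord/chr are ported by hand as Char.toNat / Char.ofNat (exact: every produced code point is valid)
def stolenLunch (note : String) : String :=
  note.toList.foldl (fun s c =>
    let o : Int := c.toNat
    if 48 ≤ o ∧ o ≤ 57 then s.push (Char.ofNat (o + 49).toNat)
    else if 97 ≤ o ∧ o ≤ 106 then s.push (Char.ofNat (o - 49).toNat)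
    else s.push c) ""

-- ===== PORT B =====
-- Source B's three replace loops: digit -> temp (U+0080+d), letter -> digit, temp -> letter
def stolenLunch_alt (note : String) : String :=
  let n1 := (PySem.List.pyRange 0 10 1).foldl
    (fun s d => PySem.Str.replace s (String.ofList [Char.ofNat (48 + d).toNat])
                                    (String.ofList [Char.ofNat (128 + d).toNat])) note
  let n2 := (PySem.List.pyRange 0 10 1).foldl
    (fun s d => PySem.Str.replace s (String.ofList [Char.ofNat (97 + d).toNat])
                                    (String.ofList [Char.ofNat (48 + d).toNat])) n1
  let n3 := (PySem.List.pyRange 0 10 1).foldl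
    (fun s d => PySem.Str.replace s (String.ofList [Char.ofNat (128 + d).toNat])
                                    (String.ofList [Char.ofNat (97 + d).toNat])) n2
  n3

-- ===== PRECONDITION & SPEC =====
def Spec_stolenLunch (note : String) (out : String) : Prop := out = stolenLunch_alt note
instance (note : String) (out : String) : Decidable (Spec_stolenLunch note out) := by unfold Spec_stolenLunch; infer_instance

-- ===== CLAIM =====
def Claim_equal_stolenLunch : Prop := ∀ (note : String), Dom_stolenLunch note → Spec_stolenLunch note (stolenLunch note)

-- ===== LEMMAS AND PROOFS =====

-- single-character substitution (what one replace pass does to each character)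
def subst (a b c : Char) : Char := if c = a then b else c

-- A's branch arithmetic as a character-to-character function
def pvAStep (c : Char) : Char :=
  if 48 ≤ (c.toNat : Int) ∧ (c.toNat : Int) ≤ 57 then Char.ofNat ((c.toNat : Int) + 49).toNat
  else if 97 ≤ (c.toNat : Int) ∧ (c.toNat : Int) ≤ 106 then Char.ofNat ((c.toNat : Int) - 49).toNat
  else c

-- B's 30 substitutions composed, in the order Source B applies them
def pvBigF (c : Char) : Char :=
  ([(48,128),(49,129),(50,130),(51,131),(52,132),(53,133),(54,134),(55,135),(56,136),(57,137),
    (97,48),(98,49),(99,50),(100,51),(101,52),(102,53),(103,54),(104,55),(105,56),(106,57),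
    (128,97),(129,98),(130,99),(131,100),(132,101),(133,102),(134,103),(135,104),(136,105),(137,106)]
      : List (Nat × Nat)).foldl (fun c p => subst (Char.ofNat p.1) (Char.ofNat p.2) c) c

theorem go_single (a b : Char) (l acc : List Char) (fuel : Nat) (h : l.length ≤ fuel) :
    PySem.Chars.replace.go [a] [b] fuel l acc = acc.reverse ++ l.map (subst a b) := by
  induction l generalizing fuel acc with
  | nil => cases fuel <;> simp [PySem.Chars.replace.go]
  | cons c t ih =>
    cases fuel with
    | zero => simp at h
    | succ m =>
      rw [PySem.Chars.replace.go]
      by_cases hc : c = a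
      · subst hc
        simp only [List.isPrefixOf_cons₂, List.isPrefixOf_nil_left, Bool.and_true, beq_self_eq_true, if_pos]
        rw [show List.drop [c].length (c :: t) = t from rfl]
        rw [ih _ _ (Nat.le_of_succ_le_succ h)]
        simp [subst]
      · have : ([a].isPrefixOf (c :: t)) = false := by
          simp [List.isPrefixOf]; exact fun hh => (hc hh.symm).elim
        simp only [this, Bool.false_eq_true, ite_false]
        rw [ih _ _ (Nat.le_of_succ_le_succ h)]
        simp [subst, hc]

theorem replace_single (a b : Char) (s : List Char) :
    PySem.Chars.replace s [a] [b] = s.map (subst a b) := by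
  rw [PySem.Chars.replace]
  simp [go_single a b s [] s.length le_rfl]

-- one Str.replace pass with single-character arguments, on the list side
theorem str_replace_single (a b : Char) (s : String) :
    (PySem.Str.replace s (String.ofList [a]) (String.ofList [b])).toList = s.toList.map (subst a b) := by
  rw [PySem.Str.toList_replace]
  simp [replace_single]

-- B's staged passes collapse to one map of the composed substitution
theorem alt_toList (note : String) :
    (stolenLunch_alt note).toList = note.toList.map pvBigF := by
  have hr : PySem.List.pyRange 0 10 1 = [0,1,2,3,4,5,6,7,8,9] := by decide
  unfold stolenLunch_alt
  rw [hr]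
  simp only [List.foldl_cons, List.foldl_nil]
  simp only [str_replace_single, List.map_map]
  apply List.map_congr_left
  intro c _
  show _ = pvBigF c
  unfold pvBigF
  simp only [List.foldl_cons, List.foldl_nil, Function.comp]
  rfl

-- the composed substitution agrees with A's arithmetic on every ASCII character
set_option maxRecDepth 4000 in
theorem pvBigF_eq_below (n : Nat) (h : n < 128) : pvBigF (Char.ofNat n) = pvAStep (Char.ofNat n) := by
  revert h
  revert n
  decide

-- A's loop body pushes exactly pvAStep c
theorem body_eq (s : String) (c : Char) :
    (let o : Int := c.toNat
     if 48 ≤ o ∧ o ≤ 57 then s.push (Char.ofNat (o + 49).toNat)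
     else if 97 ≤ o ∧ o ≤ 106 then s.push (Char.ofNat (o - 49).toNat)
     else s.push c) = s.push (pvAStep c) := by
  unfold pvAStep
  by_cases h1 : 48 ≤ (c.toNat : Int) ∧ (c.toNat : Int) ≤ 57
  · simp [h1]
  · by_cases h2 : 97 ≤ (c.toNat : Int) ∧ (c.toNat : Int) ≤ 106 <;>
      simp [h2] <;> split_ifs <;> rfl

-- folding "push the image" collects the mapped characters
theorem fold_toList (f : Char → Char) (l : List Char) (s : String) :
    (l.foldl (fun s c => s.push (f c)) s).toList = s.toList ++ l.map f := by
  induction l generalizing s with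
  | nil => simp
  | cons c t ih => simp [List.foldl, ih]

-- ===== VERDICT =====
theorem stolenLunch_spec : Claim_equal_stolenLunch := by
  intro note hdom
  unfold Spec_stolenLunch stolenLunch
  apply String.toList_inj.mp
  have hb : (fun (s : String) (c : Char) =>
      let o : Int := c.toNat
      if 48 ≤ o ∧ o ≤ 57 then s.push (Char.ofNat (o + 49).toNat)
      else if 97 ≤ o ∧ o ≤ 106 then s.push (Char.ofNat (o - 49).toNat)
      else s.push c) = fun s c => s.push (pvAStep c) := by
    funext s c
    exact body_eq s c
  rw [hb, fold_toList, alt_toList]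
  simp only [String.toList_empty, List.nil_append]
  apply List.map_congr_left
  intro c hc
  have hd : pvDomChar c = true := by
    have := (List.all_eq_true.mp hdom) c hc
    simpa using this
  have hlt : c.toNat < 128 := by
    simp [pvDomChar] at hd
    omega
  have := pvBigF_eq_below c.toNat hlt
  rwa [Char.ofNat_toNat, eq_comm] at this
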